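-- pv_equiv track=rewrite | github.com/Inigo-Alvarez/Ejercicios-tema-1 | ejercicio3.py | clasificar_numeros
-- ===== SOURCE A (Python) =====
-- def clasificar_numeros(lista):
--     pares = []
--     impares = []
--     negativos = []
--
--     for numero in lista:
--         if numero % 2 == 0:
--             pares.append(numero)
--         else:
--             impares.append(numero)
--
--         if numero < 0:
--             negativos.append(numero)
--
--     return pares, impares, negativos
-- ===== SOURCE B (Python) =====
-- def clasificar_numeros(lista):
--     # Divide and conquer: split the list in half, classify each half
--     # recursively, concatenate the per-category results (order preserved).
--     n = len(lista)
--     if n == 0: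
--         return [], [], []
--     if n == 1:
--         x = lista[0]
--         if x % 2 == 0:
--             pares, impares = [x], []
--         else:
--             pares, impares = [], [x]
--         negativos = [x] if x < 0 else []
--         return pares, impares, negativos
--     m = n // 2
--     p1, i1, n1 = clasificar_numeros(lista[:m])
--     p2, i2, n2 = clasificar_numeros(lista[m:])
--     return p1 + p2, i1 + i2, n1 + n2
-- ===== Notes on version B (the rewrite author's own statement) =====
-- stated objective: alternative
-- what changed: Replaces the single accumulating loop with a divide-and-conquer recursion: split the list in half, classify each half recursively, and concatenate the three category lists; correct because classification distributes over concatenation and order is preserved.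
import Mathlib
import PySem

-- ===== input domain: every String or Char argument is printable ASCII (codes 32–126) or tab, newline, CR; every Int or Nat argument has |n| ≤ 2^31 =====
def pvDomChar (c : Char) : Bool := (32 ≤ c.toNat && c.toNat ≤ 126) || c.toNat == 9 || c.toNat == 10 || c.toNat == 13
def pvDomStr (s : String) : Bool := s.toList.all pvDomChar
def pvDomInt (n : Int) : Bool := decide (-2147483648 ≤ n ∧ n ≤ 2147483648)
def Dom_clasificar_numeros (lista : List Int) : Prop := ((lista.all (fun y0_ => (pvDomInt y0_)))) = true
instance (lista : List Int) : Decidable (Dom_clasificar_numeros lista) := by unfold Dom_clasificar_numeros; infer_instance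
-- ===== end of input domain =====

-- B replaces A's single accumulating loop with a divide-and-conquer recursion
-- (split in half, classify halves, concatenate the three category lists).


-- ===== PORT A =====
-- A: one pass, appending to three accumulators (pares, impares, negativos)
def clasificar_numeros (lista : List Int) : List Int × List Int × List Int :=
  lista.foldl (fun (acc : List Int × List Int × List Int) numero =>
    let (pares, impares, negativos) := acc
    let (pares, impares) :=
      if PySem.Int.mod numero 2 = 0 then (pares ++ [numero], impares)
      else (pares, impares ++ [numero])
    let negativos := if numero < 0 then negativos ++ [numero] else negativos
    (pares, impares, negativos)) ([], [], [])

-- ===== PORT B =====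
-- B: divide and conquer; lista[:m] / lista[m:] ported as take/drop (exact here
-- since 0 ≤ m ≤ len(lista))
def clasificar_numeros_alt : List Int → List Int × List Int × List Int
  | [] => ([], [], [])
  | [x] =>
    ((if PySem.Int.mod x 2 = 0 then [x] else []),
     (if PySem.Int.mod x 2 = 0 then [] else [x]),
     (if x < 0 then [x] else []))
  | a :: b :: t =>
    let l := a :: b :: t
    let m := l.length / 2
    let (p1, i1, n1) := clasificar_numeros_alt (l.take m)
    let (p2, i2, n2) := clasificar_numeros_alt (l.drop m)
    (p1 ++ p2, i1 ++ i2, n1 ++ n2)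
  termination_by lista => lista.length
  decreasing_by
  · simp [List.length_take]; omega
  · simp [List.length_drop]; omega

-- ===== PRECONDITION & SPEC =====
def Spec_clasificar_numeros (lista : List Int) (out : List Int × List Int × List Int) : Prop := out = clasificar_numeros_alt lista
instance (lista : List Int) (out : List Int × List Int × List Int) : Decidable (Spec_clasificar_numeros lista out) := by unfold Spec_clasificar_numeros; infer_instance

-- ===== CLAIM (what is proved, stated in full; the proofs are below) =====
def Claim_equal_clasificar_numeros : Prop := ∀ (lista : List Int), Dom_clasificar_numeros lista → Spec_clasificar_numeros lista (clasificar_numeros lista)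

-- ===== LEMMAS AND PROOFS =====

-- Both sides equal the three filters of the input, in order.
def pvFilters (lista : List Int) : List Int × List Int × List Int :=
  (lista.filter (fun x => PySem.Int.mod x 2 = 0),
   lista.filter (fun x => ¬ PySem.Int.mod x 2 = 0),
   lista.filter (fun x => x < 0))

theorem clasificar_numeros_fold (lista p i n : List Int) :
    lista.foldl (fun (acc : List Int × List Int × List Int) numero =>
      let (pares, impares, negativos) := acc
      let (pares, impares) :=
        if PySem.Int.mod numero 2 = 0 then (pares ++ [numero], impares)
        else (pares, impares ++ [numero])
      let negativos := if numero < 0 then negativos ++ [numero] else negativos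
      (pares, impares, negativos)) (p, i, n)
    = (p ++ (pvFilters lista).1, i ++ (pvFilters lista).2.1, n ++ (pvFilters lista).2.2) := by
  induction lista generalizing p i n with
  | nil => simp [pvFilters]
  | cons a t ih =>
    by_cases h : PySem.Int.mod a 2 = 0 <;> by_cases h2 : a < 0 <;>
      simp only [pvFilters, List.foldl_cons, List.filter_cons, h, h2, decide_true, decide_false,
        ne_eq, not_true_eq_false, not_false_eq_true, if_true, if_false, ih,
        List.append_assoc, List.singleton_append] <;> simp [pvFilters]

theorem pvFilters_append (l1 l2 : List Int) :
    pvFilters (l1 ++ l2)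
      = ((pvFilters l1).1 ++ (pvFilters l2).1,
         (pvFilters l1).2.1 ++ (pvFilters l2).2.1,
         (pvFilters l1).2.2 ++ (pvFilters l2).2.2) := by
  simp [pvFilters, List.filter_append]

theorem clasificar_numeros_alt_eq (lista : List Int) :
    clasificar_numeros_alt lista = pvFilters lista := by
  fun_induction clasificar_numeros_alt lista with
  | case1 => simp [pvFilters]
  | case2 x =>
    by_cases h : PySem.Int.mod x 2 = 0 <;> by_cases h2 : x < 0 <;>
      simp only [pvFilters, List.filter_cons, List.filter_nil, h, h2, decide_true,
        decide_false, not_true_eq_false, not_false_eq_true, if_true, if_false] <;> simp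
  | case3 a b t l m p1 i1 n1 h1 p2 i2 n2 h2 ih1 ih2 =>
    have := pvFilters_append (l.take m) (l.drop m)
    rw [List.take_append_drop] at this
    rw [ih1] at h1; rw [ih2] at h2
    rw [this, h1, h2]

theorem clasificar_numeros_spec : Claim_equal_clasificar_numeros := by
  intro lista _
  unfold Spec_clasificar_numeros clasificar_numeros
  rw [clasificar_numeros_alt_eq]
  simpa using clasificar_numeros_fold lista [] [] []
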